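-- pv_equiv track=rewrite | github.com/AndreSchrottenloher/mitm-milp | feistelsgad/simpira_implementation.py | nbr_of_df
-- ===== SOURCE A (Python) =====
-- def nbr_of_df(b):
--     res = 0
--     d = (b // 2) * 2
--     for j in range(3):
--         if d != b:
--             res += 1
--         for r in range(d - 1):
--             res += 1
--             if (r != d - r - 2):
--                 res += 1
--         if d != b:
--             res += 1
--     return res
-- ===== SOURCE B (Python) =====
-- def nbr_of_df(b):
--     # Closed form: each of the 3 outer iterations contributes the same amount.
--     # Inner loop over range(d-1) adds 2 per step except at the unique r=(d-2)//2,
--     # giving 2*d-3 when d >= 2 and 0 otherwise; the two d!=b checks add 2 when b is odd.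
--     d = (b // 2) * 2
--     inner = 2 * d - 3 if d >= 2 else 0
--     return 3 * (inner + (2 if d != b else 0))
-- ===== Notes on version B (the rewrite author's own statement) =====
-- stated objective: faster
-- what changed: Replaced the triple outer loop and the O(b) inner counting loop by a closed-form arithmetic formula (3*(2d-3) for the inner loop plus the parity term), computed in O(1).
import Mathlib
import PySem

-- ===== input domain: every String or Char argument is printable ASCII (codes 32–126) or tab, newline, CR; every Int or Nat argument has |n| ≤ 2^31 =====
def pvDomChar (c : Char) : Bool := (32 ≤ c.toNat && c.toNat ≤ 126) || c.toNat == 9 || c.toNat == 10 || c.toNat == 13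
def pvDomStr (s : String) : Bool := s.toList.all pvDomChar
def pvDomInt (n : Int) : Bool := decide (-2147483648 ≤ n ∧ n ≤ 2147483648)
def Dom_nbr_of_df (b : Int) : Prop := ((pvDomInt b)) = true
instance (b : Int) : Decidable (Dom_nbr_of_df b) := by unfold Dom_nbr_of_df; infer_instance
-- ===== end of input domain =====

-- B replaces the three nested counting loops by a closed-form O(1) arithmetic formula.

-- ===== PORT A =====
def nbr_of_df (b : Int) : Int :=
  let d := PySem.Int.floordiv b 2 * 2
  (PySem.List.pyRange 0 3 1).foldl (fun res _j =>
    let res := if d ≠ b then res + 1 else res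
    let res := (PySem.List.pyRange 0 (d - 1) 1).foldl (fun res r =>
      let res := res + 1
      if r ≠ d - r - 2 then res + 1 else res) res
    if d ≠ b then res + 1 else res) 0

-- ===== PORT B =====
def nbr_of_df_alt (b : Int) : Int :=
  let d := PySem.Int.floordiv b 2 * 2
  let inner := if d ≥ 2 then 2 * d - 3 else 0
  3 * (inner + (if d ≠ b then 2 else 0))

-- ===== PRECONDITION & SPEC =====
def Spec_nbr_of_df (b : Int) (out : Int) : Prop := out = nbr_of_df_alt b
instance (b : Int) (out : Int) : Decidable (Spec_nbr_of_df b out) := by unfold Spec_nbr_of_df; infer_instance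

-- ===== CLAIM (what is proved, stated in full; the proofs are below) =====
def Claim_equal_nbr_of_df : Prop := ∀ (b : Int), Dom_nbr_of_df b → Spec_nbr_of_df b (nbr_of_df b)

-- ===== LEMMAS AND PROOFS =====

-- The inner loop of A adds 2 per index r, except 1 at the unique r with 2r = d-2.
theorem pv_inner_eq (d : Int) (n : Nat) (acc : Int) :
    (PySem.List.pyRange 0 (n : Int) 1).foldl (fun res r =>
      let res := res + 1
      if r ≠ d - r - 2 then res + 1 else res) acc
    = acc + 2 * n - (if d % 2 = 0 ∧ 2 ≤ d ∧ d - 2 < 2 * (n : Int) then 1 else 0) := by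
  induction n generalizing acc with
  | zero =>
    rw [PySem.List.pyRange_one_eq_nil (by norm_num)]
    simp only [List.foldl_nil, Nat.cast_zero]
    split_ifs with h <;> omega
  | succ n ih =>
    rw [show ((n + 1 : Nat) : Int) = (n : Int) + 1 by push_cast; ring,
        PySem.List.pyRange_one_succ_right (by positivity), List.foldl_append]
    simp only [List.foldl_cons, List.foldl_nil, ih]
    split_ifs <;> omega

theorem pv_inner_closed (d : Int) (hk : ∃ k : Int, d = 2 * k) (acc : Int) :
    (PySem.List.pyRange 0 (d - 1) 1).foldl (fun res r =>
      let res := res + 1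
      if r ≠ d - r - 2 then res + 1 else res) acc
    = acc + (if d ≥ 2 then 2 * d - 3 else 0) := by
  obtain ⟨k, hkk⟩ := hk
  by_cases h2 : 2 ≤ d
  · have hcast : (d - 1) = (((d - 1).toNat : Nat) : Int) := by omega
    rw [hcast, pv_inner_eq]
    have : ((d - 1).toNat : Int) = d - 1 := by omega
    rw [this]
    split_ifs <;> omega
  · rw [PySem.List.pyRange_one_eq_nil (by omega)]
    simp only [List.foldl_nil]
    split_ifs <;> omega

theorem pv_nbr_of_df_eq (b : Int) : nbr_of_df b = nbr_of_df_alt b := by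
  unfold nbr_of_df nbr_of_df_alt
  have hr3 : PySem.List.pyRange 0 3 1 = [0, 1, 2] := by decide
  simp only [hr3, List.foldl_cons, List.foldl_nil]
  have hk : ∃ k : Int, PySem.Int.floordiv b 2 * 2 = 2 * k :=
    ⟨PySem.Int.floordiv b 2, by ring⟩
  rw [pv_inner_closed _ hk, pv_inner_closed _ hk, pv_inner_closed _ hk]
  split_ifs <;> ring

-- ===== VERDICT (by name: the statement is the Claim_ definition above) =====
theorem nbr_of_df_spec : Claim_equal_nbr_of_df := by
  intro b _
  unfold Spec_nbr_of_df
  exact pv_nbr_of_df_eq b
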